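-- pv_equiv track=rewrite | github.com/tumuum/prog-book | code/no_111.py | no_111
-- ===== SOURCE A (Python) =====
-- def no_111(word):
-- 	count = 0
-- 	retval = True
--
-- 	for s in word:
-- 		if s == '1':
-- 			count = count + 1
-- 		else:
-- 			count = 0
--
-- 		if count == 3:
-- 			retval = False
--
-- 	return retval
-- ===== SOURCE B (Python) =====
-- def no_111(word):
-- 	return '111' not in word
-- ===== Notes on version B (the rewrite author's own statement) =====
-- stated objective: idiomatic
-- what changed: Replaced the reset-on-mismatch counter loop by a single substring membership test: a run of three consecutive ones exists iff the three-character pattern occurs in the string.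
import Mathlib
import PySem

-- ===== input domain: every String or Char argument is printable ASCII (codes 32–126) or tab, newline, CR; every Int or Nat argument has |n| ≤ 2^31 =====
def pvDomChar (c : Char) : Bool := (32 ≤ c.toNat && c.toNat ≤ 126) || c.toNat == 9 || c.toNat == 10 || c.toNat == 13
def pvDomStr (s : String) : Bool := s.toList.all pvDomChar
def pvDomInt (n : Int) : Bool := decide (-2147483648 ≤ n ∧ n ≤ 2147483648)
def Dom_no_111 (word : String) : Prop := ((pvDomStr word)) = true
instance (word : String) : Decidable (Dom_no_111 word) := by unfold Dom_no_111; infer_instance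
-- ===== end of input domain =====

-- B replaces A's reset-on-mismatch counter loop with a single substring test '111' not in word (idiomatic).

-- ===== PORT A =====
-- the for-loop over the characters, carrying (count, retval)
def no_111 (word : String) : Bool :=
  (word.toList.foldl
    (fun (st : Int × Bool) s =>
      let count := if s == '1' then st.1 + 1 else 0
      let retval := if count == 3 then false else st.2
      (count, retval))
    (0, true)).2

-- ===== PORT B =====
def no_111_alt (word : String) : Bool := !(PySem.Str.isIn "111" word)

-- ===== PRECONDITION & SPEC =====
def Spec_no_111 (word : String) (out : Bool) : Prop := out = no_111_alt word
instance (word : String) (out : Bool) : Decidable (Spec_no_111 word out) := by unfold Spec_no_111; infer_instance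

-- ===== CLAIM (what is proved, stated in full; the proofs are below) =====
def Claim_equal_no_111 : Prop := ∀ (word : String), Dom_no_111 word → Spec_no_111 word (no_111 word)

-- ===== LEMMAS AND PROOFS =====

-- proof device: does A's loop, started at count = c, ever hit count == 3 on l?
def badA (c : Int) : List Char → Bool
  | [] => false
  | x :: xs => if x == '1' then (c + 1 == 3) || badA (c + 1) xs else badA 0 xs

theorem foldA_eq (l : List Char) : ∀ (c : Int) (r : Bool),
    (l.foldl
      (fun (st : Int × Bool) s =>
        let count := if s == '1' then st.1 + 1 else 0
        let retval := if count == 3 then false else st.2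
        (count, retval))
      (c, r)).2 = (r && !badA c l) := by
  induction l with
  | nil => intro c r; simp [badA]
  | cons x xs ih =>
    intro c r
    simp only [List.foldl_cons, badA]
    by_cases hx : x == '1'
    · simp only [hx, if_true]
      rw [ih]
      by_cases h3 : (c + 1 == 3) = true
      · simp [h3]
      · simp [h3]
    · simp only [hx]
      rw [ih]
      simp

theorem replicate_prefix_mono {c : Char} {l : List Char} {m n : Nat} (h : m ≤ n)
    (hp : List.replicate n c <+: l) : List.replicate m c <+: l :=
  List.IsPrefix.trans ⟨List.replicate (n - m) c, by rw [← List.replicate_add]; congr 1; omega⟩ hp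

theorem badA_iff (l : List Char) : ∀ (c : Int), 0 ≤ c → c ≤ 2 →
    (badA c l = true ↔ (List.replicate (3 - c).toNat '1' <+: l ∨ ['1', '1', '1'] <:+: l)) := by
  induction l with
  | nil =>
    intro c h0 h2
    simp only [badA]
    constructor
    · intro h; cases h
    · rintro (h | h)
      · exfalso
        have : (3 - c).toNat ≠ 0 := by omega
        have := h.length_le
        simp at this
        omega
      · exact absurd h.length_le (by simp)
  | cons x xs ih =>
    intro c h0 h2
    have hinf : (['1', '1', '1'] <:+: x :: xs) ↔ (['1', '1', '1'] <+: x :: xs ∨ ['1', '1', '1'] <:+: xs) :=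
      List.infix_cons_iff
    by_cases hx : x = '1'
    · subst hx
      simp only [badA, beq_self_eq_true, if_true]
      by_cases h3 : c = 2
      · subst h3
        simp only [show ((2 : Int) + 1 == 3) = true from rfl, Bool.true_or, true_iff]
        left
        have : ((3 : Int) - 2).toNat = 1 := by decide
        rw [this]
        simp [List.replicate]
      · have h3' : ((c + 1 == 3) : Bool) = false := by
          simp only [beq_eq_false_iff_ne]; omega
        rw [h3', Bool.false_or, ih (c + 1) (by omega) (by omega)]
        have hrep : ∀ n : Nat, (List.replicate (n + 1) '1' <+: '1' :: xs) ↔ (List.replicate n '1' <+: xs) := by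
          intro n; simp [List.replicate]
        constructor
        · rintro (h | h)
          · left
            have : (3 - c).toNat = (3 - (c + 1)).toNat + 1 := by omega
            rw [this, hrep]; exact h
          · right; exact hinf.2 (Or.inr h)
        · rintro (h | h)
          · left
            have : (3 - c).toNat = (3 - (c + 1)).toNat + 1 := by omega
            rw [this, hrep] at h; exact h
          · rcases hinf.1 h with h' | h'
            · -- ['1','1','1'] <+: '1'::xs ⇒ replicate 2 '1' <+: xs ⇒ replicate (3-(c+1)).toNat '1' <+: xs
              left
              have h2' : List.replicate 2 '1' <+: xs := by
                have : (['1', '1', '1'] : List Char) = List.replicate 3 '1' := by decide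
                rw [this] at h'
                exact (hrep 2).1 (by simpa using h')
              exact replicate_prefix_mono (by omega) h2'
            · right; exact h'
    · have hxb : (x == '1') = false := by simp [hx]
      simp only [badA, hxb, Bool.false_eq_true, if_false]
      rw [ih 0 (by omega) (by omega)]
      have hnp : ∀ n : Nat, n ≠ 0 → ¬ (List.replicate n '1' <+: x :: xs) := by
        intro n hn hp
        cases n with
        | zero => exact hn rfl
        | succ m =>
          rcases hp with ⟨t, ht⟩
          simp [List.replicate] at ht
          exact hx ht.1.symm
      constructor
      · rintro (h | h)
        · right; exact hinf.2 (Or.inr (List.IsPrefix.isInfix (by simpa using h)))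
        · right; exact hinf.2 (Or.inr h)
      · rintro (h | h)
        · exact absurd h (hnp _ (by omega))
        · rcases hinf.1 h with h' | h'
          · exfalso
            have : (['1', '1', '1'] : List Char) = List.replicate 3 '1' := by decide
            exact hnp 3 (by omega) (this ▸ h')
          · right; exact h'

theorem badA_zero_iff_infix (l : List Char) :
    badA 0 l = true ↔ ['1', '1', '1'] <:+: l := by
  rw [badA_iff l 0 (by omega) (by omega)]
  constructor
  · rintro (h | h)
    · exact List.IsPrefix.isInfix (by simpa using h)
    · exact h
  · intro h; exact Or.inr h

-- ===== VERDICT (by name: the statement is the Claim_ definition above) =====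
theorem no_111_spec : Claim_equal_no_111 := by
  intro word _
  unfold Spec_no_111 no_111 no_111_alt
  rw [foldA_eq, Bool.true_and]
  congr 1
  rcases h : badA 0 word.toList with _ | _
  · symm
    rw [← Bool.not_eq_true] at h ⊢
    rw [PySem.Str.isIn_iff_infix]
    intro hin
    exact h ((badA_zero_iff_infix _).2 (by simpa using hin))
  · symm
    rw [PySem.Str.isIn_iff_infix]
    simpa using (badA_zero_iff_infix _).1 h
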